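-- pv_equiv track=rewrite | github.com/byqusai/amani | test/enhanced_asset_generator_agent.py | _determine_template_key
-- ===== SOURCE A (Python) =====
-- from typing import Dict, List, Any, Optional, Tuple
--
-- def _determine_template_key(asset_type: str, available_keys: List[str]) -> str:
--     """Determine which prompt template to use for an asset type."""
--     asset_parts = asset_type.split('_')
--
--     # Direct match
--     for key in available_keys:
--         if key in asset_type:
--             return key
--
--     # Partial match
--     for key in available_keys:
--         if any(part in key for part in asset_parts):
--             return key
--
--     # Fallback to first available template
--     return list(available_keys)[0]
-- ===== SOURCE B (Python) =====
-- def _determine_template_key(asset_type: str, available_keys):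
--     """Score every key by match tier (0 direct, 1 partial, 2 none) and return
--     the argmin by (tier, position) via a single min() over the scored pairs."""
--     parts = asset_type.split('_')
--
--     def tier(key):
--         if key in asset_type:
--             return 0
--         if any(part in key for part in parts):
--             return 1
--         return 2
--
--     _, best = min(enumerate(available_keys), key=lambda t: (tier(t[1]), t[0]))
--     return best
-- ===== Notes on version B (the rewrite author's own statement) =====
-- stated objective: alternative
-- what changed: Replaces A's staged control flow (direct-match scan, then partial-match scan, then head fallback) by a scoring algorithm: every key is assigned a match tier and the result is a single min() argmin over (tier, position).
import Mathlib
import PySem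

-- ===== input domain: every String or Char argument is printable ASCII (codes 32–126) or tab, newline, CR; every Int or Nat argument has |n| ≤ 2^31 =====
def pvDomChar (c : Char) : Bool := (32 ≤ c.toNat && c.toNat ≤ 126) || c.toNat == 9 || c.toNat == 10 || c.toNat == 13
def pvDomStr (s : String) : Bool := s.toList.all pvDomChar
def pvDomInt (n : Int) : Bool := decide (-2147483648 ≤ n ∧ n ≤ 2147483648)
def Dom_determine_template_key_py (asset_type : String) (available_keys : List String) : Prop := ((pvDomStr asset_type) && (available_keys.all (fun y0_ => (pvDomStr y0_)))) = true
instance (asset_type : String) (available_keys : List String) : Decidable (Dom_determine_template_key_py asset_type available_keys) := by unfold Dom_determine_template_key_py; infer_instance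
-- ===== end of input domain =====

-- B replaces A's staged scans by scoring every key with a match tier and taking one argmin by (tier, position); equal value on a nonempty key list.

-- ===== PORT A =====
def determine_template_key_py (asset_type : String) (available_keys : List String) : String :=
  let asset_parts := (PySem.Str.split? asset_type "_").getD []  -- sep "_" ≠ "", never none
  -- first loop: direct match (first key that is a substring of asset_type)
  match available_keys.find? (fun key => PySem.Str.isIn key asset_type) with
  | some k => k
  | none =>
    -- second loop: partial match (first key containing any part)
    match available_keys.find? (fun key => asset_parts.any (fun part => PySem.Str.isIn part key)) with
    | some k => k
    | none =>
      -- list(available_keys)[0]; IndexError on [] (excluded by Pre_)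
      match available_keys with
      | [] => ""
      | k :: _ => k

-- ===== PORT B =====
-- tier(key): 0 direct match, 1 partial match, 2 otherwise
def pvTier (asset_type : String) (asset_parts : List String) (key : String) : Int :=
  if PySem.Str.isIn key asset_type then 0
  else if asset_parts.any (fun part => PySem.Str.isIn part key) then 1
  else 2

def determine_template_key_py_alt (asset_type : String) (available_keys : List String) : String :=
  let asset_parts := (PySem.Str.split? asset_type "_").getD []  -- sep "_" ≠ "", never none
  -- min(enumerate(available_keys), key=lambda t: (tier(t[1]), t[0]))
  match PySem.List.min2? (PySem.List.enumerate available_keys)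
      (fun t => pvTier asset_type asset_parts t.2) (fun t => t.1) with
  | some t => t.2
  | none => ""  -- ValueError of min() on an empty list (excluded by Pre_)

-- ===== PRECONDITION & SPEC =====
-- Pre_ excludes only the empty key list, on which A raises IndexError and B's min() raises ValueError.
def Pre_determine_template_key_py (asset_type : String) (available_keys : List String) : Prop :=
  available_keys ≠ []
instance (asset_type : String) (available_keys : List String) : Decidable (Pre_determine_template_key_py asset_type available_keys) := by unfold Pre_determine_template_key_py; infer_instance

def pvWitness_determine_template_key_py : String × List String := ("character_sprite", ["ui", "character"])

def Spec_determine_template_key_py (asset_type : String) (available_keys : List String) (out : String) : Prop := out = determine_template_key_py_alt asset_type available_keys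
instance (asset_type : String) (available_keys : List String) (out : String) : Decidable (Spec_determine_template_key_py asset_type available_keys out) := by unfold Spec_determine_template_key_py; infer_instance

-- ===== CLAIM =====
def Claim_equal_determine_template_key_py : Prop := ∀ (asset_type : String) (available_keys : List String), Dom_determine_template_key_py asset_type available_keys → Pre_determine_template_key_py asset_type available_keys → Spec_determine_template_key_py asset_type available_keys (determine_template_key_py asset_type available_keys)

-- ===== LEMMAS AND PROOFS =====

-- abstract tier from two predicates
def pvTierOf (p q : String → Bool) (k : String) : Int :=
  if p k then 0 else if q k then 1 else 2

-- the pure first-argmin recursion over indexed pairs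
def pvChoose (tier : String → Int) (m : Int × String) : List (Int × String) → Int × String
  | [] => m
  | x :: t => pvChoose tier (if tier x.2 < tier m.2 then x else m) t

-- same recursion forgetting the indices
def pvChooseS (tier : String → Int) (m : String) : List String → String
  | [] => m
  | k :: t => pvChooseS tier (if tier k < tier m then k else m) t

-- a fold that keeps the current best and replaces it only on a strictly smaller tier:
-- over enumerate with strictly larger indices, min2?'s index tie-break never fires
theorem foldl_first_argmin (tier : String → Int)
    (f : Option (Int × String) → Int × String → Option (Int × String))
    (hf : ∀ (m x : Int × String), m.1 < x.1 →
      f (some m) x = if tier x.2 < tier m.2 then some x else some m) :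
    ∀ (l : List String) (s : Int) (m : Int × String), m.1 < s →
    (PySem.List.enumerate l s).foldl f (some m)
      = some (pvChoose tier m (PySem.List.enumerate l s)) := by
  intro l
  induction l with
  | nil => intro s m _; simp [PySem.List.enumerate_nil, pvChoose]
  | cons x xs ih =>
    intro s m hm
    rw [PySem.List.enumerate_cons]
    simp only [List.foldl_cons, pvChoose]
    rw [hf m (s, x) (by simpa using hm)]
    by_cases h : tier (s, x).2 < tier m.2
    · rw [if_pos h, if_pos h]; exact ih (s + 1) (s, x) (by simp)
    · rw [if_neg h, if_neg h]; exact ih (s + 1) m (by omega)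

-- pvChoose only looks at the second components
theorem choose_snd (tier : String → Int) :
    ∀ (e : List (Int × String)) (m : Int × String),
    (pvChoose tier m e).2 = pvChooseS tier m.2 (e.map (·.2)) := by
  intro e
  induction e with
  | nil => intro m; rfl
  | cons x t ih =>
    intro m
    simp only [pvChoose, pvChooseS, List.map_cons]
    by_cases h : tier x.2 < tier m.2 <;> simp [h, ih]

-- the crux: first-argmin by tier is the staged first-match search
theorem chooseS_staged (p q : String → Bool) :
    ∀ (l : List String) (m : String),
    pvChooseS (pvTierOf p q) m l =
      if p m then m
      else match l.find? p with
        | some k => k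
        | none =>
          if q m then m
          else match l.find? q with
            | some k => k
            | none => m := by
  intro l
  induction l with
  | nil => intro m; by_cases hp : p m <;> simp [pvChooseS, hp]
  | cons k t ih =>
    intro m
    simp only [pvChooseS, List.find?_cons]
    by_cases hpm : p m
    · have : ¬ pvTierOf p q k < pvTierOf p q m := by
        unfold pvTierOf; simp [hpm]; split_ifs <;> omega
      rw [if_neg this, ih m]
      simp [hpm]
    · by_cases hpk : p k
      · have : pvTierOf p q k < pvTierOf p q m := by
          unfold pvTierOf; simp [hpm, hpk]; split_ifs <;> omega
        rw [if_pos this, ih k]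
        simp [hpm, hpk]
      · by_cases hqm : q m
        · have : ¬ pvTierOf p q k < pvTierOf p q m := by
            unfold pvTierOf; simp [hpm, hpk, hqm]; split_ifs <;> omega
          rw [if_neg this, ih m]
          simp [hpm, hpk, hqm]
        · by_cases hqk : q k
          · have : pvTierOf p q k < pvTierOf p q m := by
              unfold pvTierOf; simp [hpm, hpk, hqm, hqk]
            rw [if_pos this, ih k]
            simp [hpm, hpk, hqm, hqk]
          · have : ¬ pvTierOf p q k < pvTierOf p q m := by
              unfold pvTierOf; simp [hpm, hpk, hqm, hqk]
            rw [if_neg this, ih m]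
            simp [hpm, hpk, hqm, hqk]

theorem determine_template_key_eq (asset_type : String) (available_keys : List String)
    (h : available_keys ≠ []) :
    determine_template_key_py asset_type available_keys
      = determine_template_key_py_alt asset_type available_keys := by
  obtain ⟨k0, rest, rfl⟩ : ∃ k0 rest, available_keys = k0 :: rest := by
    cases available_keys with
    | nil => exact absurd rfl h
    | cons a b => exact ⟨a, b, rfl⟩
  have hB : determine_template_key_py_alt asset_type (k0 :: rest)
      = pvChooseS (pvTier asset_type ((PySem.Str.split? asset_type "_").getD [])) k0 rest := by
    unfold determine_template_key_py_alt PySem.List.min2?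
    rw [PySem.List.enumerate_cons]
    simp only [List.foldl_cons]
    rw [foldl_first_argmin (pvTier asset_type ((PySem.Str.split? asset_type "_").getD []))
        _ ?hf rest (0 + 1) ((0 : Int), k0) (by norm_num)]
    · simp [choose_snd, PySem.List.map_snd_enumerate]
    case hf =>
      intro m x hx
      have hC : ¬ (x.1 < m.1) := by omega
      simp [hC]
  have hTier : pvTier asset_type ((PySem.Str.split? asset_type "_").getD [])
      = pvTierOf (fun key => PySem.Str.isIn key asset_type)
          (fun key => ((PySem.Str.split? asset_type "_").getD []).any
            (fun part => PySem.Str.isIn part key)) := rfl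
  rw [hB, hTier, chooseS_staged]
  unfold determine_template_key_py
  simp only [List.find?_cons]
  cases hpk0 : PySem.Str.isIn k0 asset_type <;>
    cases hqk0 : ((PySem.Str.split? asset_type "_").getD []).any
        (fun part => PySem.Str.isIn part k0) <;>
      cases hfp : rest.find? (fun key => PySem.Str.isIn key asset_type) <;>
        cases hfq : rest.find? (fun key => ((PySem.Str.split? asset_type "_").getD []).any
            (fun part => PySem.Str.isIn part key)) <;>
          (simp only [hpk0, hqk0, hfp, hfq] <;> rfl)

-- ===== VERDICT =====
theorem determine_template_key_py_spec : Claim_equal_determine_template_key_py := by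
  intro asset_type available_keys _ hpre
  unfold Spec_determine_template_key_py
  exact determine_template_key_eq asset_type available_keys hpre
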